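-- pv_equiv track=rewrite | github.com/GABallena/Investigations | biological_kmers.py | get_hamming_neighbors
-- ===== SOURCE A (Python) =====
-- def get_hamming_neighbors(sequence, max_dist=2):
--     """Get all sequences within Hamming distance."""
--     neighbors = set()
--     bases = ['A', 'T', 'G', 'C']
--
--     def recursive_neighbors(seq, pos, dist):
--         if dist > max_dist:
--             return
--         neighbors.add(seq)
--         if pos >= len(seq):
--             return
--
--         orig_base = seq[pos]
--         for base in bases:
--             if base != orig_base:
--                 new_seq = seq[:pos] + base + seq[pos+1:]
--                 recursive_neighbors(new_seq, pos+1, dist+1)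
--         recursive_neighbors(seq, pos+1, dist)
--
--     recursive_neighbors(sequence, 0, 0)
--     return neighbors
-- ===== SOURCE B (Python) =====
-- def get_hamming_neighbors(sequence, max_dist=2):
--     """Get all sequences within Hamming distance."""
--     if max_dist < 0:
--         return set()
--     bases = 'ATGC'
--     out = [sequence]
--
--     def emit(s, pos, budget):
--         if budget <= 0:
--             return
--         for i in range(pos, len(s)):
--             c = s[i]
--             for b in bases:
--                 if b != c:
--                     t = s[:i] + b + s[i+1:]
--                     out.append(t)
--                     emit(t, i + 1, budget - 1)
--
--     emit(sequence, 0, max_dist)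
--     return set(out)
-- ===== Notes on version B (the rewrite author's own statement) =====
-- stated objective: alternative
-- what changed: Instead of A's recursion that branches change-or-skip at every position and re-inserts every intermediate string into a dedup set O(n) times, B enumerates each neighbor exactly once (loop over the next changed position with a mutation budget), appending to a list and forming the set once at the end; intended as faster (measured 5.67x at the largest size both finished, unconfirmed by the timing gate because both time out on the exponentially large outputs beyond that).
import Mathlib
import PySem

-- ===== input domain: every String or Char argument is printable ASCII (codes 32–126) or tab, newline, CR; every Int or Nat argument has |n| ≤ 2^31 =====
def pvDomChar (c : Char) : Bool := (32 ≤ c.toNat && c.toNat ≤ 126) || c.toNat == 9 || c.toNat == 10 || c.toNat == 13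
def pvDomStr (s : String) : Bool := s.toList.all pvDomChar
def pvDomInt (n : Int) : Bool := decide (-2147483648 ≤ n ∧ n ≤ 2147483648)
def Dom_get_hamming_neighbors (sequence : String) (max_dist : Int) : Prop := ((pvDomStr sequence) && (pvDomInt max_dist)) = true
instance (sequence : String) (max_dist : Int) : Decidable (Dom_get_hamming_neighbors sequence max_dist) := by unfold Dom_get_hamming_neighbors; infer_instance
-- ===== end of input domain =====

-- B replaces A's change-or-skip recursion with a dedup set by a budgeted enumeration that
-- builds each neighbor exactly once (both return a set, so output order is immaterial).

-- seq[:i] + b + seq[i+1:]  (shared string surgery; exact for 0 ≤ i < len)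
def pvSubst (s : List Char) (i : Nat) (b : Char) : List Char :=
  s.take i ++ b :: s.drop (i + 1)

-- termination helpers for both ports (cited in decreasing_by; also used by the proofs below)
theorem pvSubst_length {s : List Char} {i : Nat} (h : i < s.length) (b : Char) :
    (pvSubst s i b).length = s.length := by
  simp only [pvSubst, List.length_append, List.length_take, List.length_cons,
    List.length_drop, Nat.min_eq_left h.le]
  omega

theorem pvSubst_sub_lt {s : List Char} {pos : Nat} (h : ¬ s.length ≤ pos) (b : Char) :
    (pvSubst s pos b).length - (pos + 1) < s.length - pos := by
  rw [pvSubst_length (by omega)]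
  omega

-- ===== PORT A =====
-- recursive_neighbors(seq, pos, dist) with the accumulator set threaded explicitly;
-- the 'for base in bases' loop over the literal 4-element list is unrolled.
def pvRecA (maxd : Int) (s : List Char) (pos : Nat) (dist : Int)
    (acc : PySem.Set (List Char)) : PySem.Set (List Char) :=
  if dist > maxd then acc
  else
    let acc1 := PySem.Set.add acc s
    if h : s.length ≤ pos then acc1
    else
      let orig := s[pos]
      let a2 := if 'A' ≠ orig then pvRecA maxd (pvSubst s pos 'A') (pos+1) (dist+1) acc1 else acc1
      let a3 := if 'T' ≠ orig then pvRecA maxd (pvSubst s pos 'T') (pos+1) (dist+1) a2 else a2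
      let a4 := if 'G' ≠ orig then pvRecA maxd (pvSubst s pos 'G') (pos+1) (dist+1) a3 else a3
      let a5 := if 'C' ≠ orig then pvRecA maxd (pvSubst s pos 'C') (pos+1) (dist+1) a4 else a4
      pvRecA maxd s (pos+1) dist a5
  termination_by s.length - pos
  decreasing_by all_goals (first | exact pvSubst_sub_lt h _ | omega)

def get_hamming_neighbors (sequence : String) (max_dist : Int) : List String :=
  (pvRecA max_dist sequence.toList 0 0 PySem.Set.empty).map String.ofList

-- ===== PORT B =====
-- emit(s, pos, budget): the list of strings B appends; the inner loop over 'ATGC' is unrolled.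
def pvEmitB (budget : Int) (s : List Char) (pos : Nat) : List (List Char) :=
  if budget ≤ 0 then []
  else if h : s.length ≤ pos then []
  else
    let c := s[pos]
    (if 'A' ≠ c then pvSubst s pos 'A' :: pvEmitB (budget-1) (pvSubst s pos 'A') (pos+1) else [])
    ++ (if 'T' ≠ c then pvSubst s pos 'T' :: pvEmitB (budget-1) (pvSubst s pos 'T') (pos+1) else [])
    ++ (if 'G' ≠ c then pvSubst s pos 'G' :: pvEmitB (budget-1) (pvSubst s pos 'G') (pos+1) else [])
    ++ (if 'C' ≠ c then pvSubst s pos 'C' :: pvEmitB (budget-1) (pvSubst s pos 'C') (pos+1) else [])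
    ++ pvEmitB budget s (pos+1)
  termination_by s.length - pos
  decreasing_by all_goals (first | exact pvSubst_sub_lt h _ | omega)

def get_hamming_neighbors_alt (sequence : String) (max_dist : Int) : List String :=
  if max_dist < 0 then []
  else (PySem.Set.ofList (sequence.toList :: pvEmitB max_dist sequence.toList 0)).map String.ofList

-- ===== PRECONDITION & SPEC =====
def Spec_get_hamming_neighbors (sequence : String) (max_dist : Int) (out : List String) : Prop := out = get_hamming_neighbors_alt sequence max_dist
instance (sequence : String) (max_dist : Int) (out : List String) : Decidable (Spec_get_hamming_neighbors sequence max_dist out) := by unfold Spec_get_hamming_neighbors; infer_instance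

-- ===== CLAIM (what is proved, stated in full; the proofs are below) =====
def Claim_equal_get_hamming_neighbors : Prop := ∀ (sequence : String) (max_dist : Int), Dom_get_hamming_neighbors sequence max_dist → Spec_get_hamming_neighbors sequence max_dist (get_hamming_neighbors sequence max_dist)

-- ===== LEMMAS AND PROOFS =====

theorem pvRecA_of_gt {maxd dist : Int} {s : List Char} {pos : Nat}
    {acc : PySem.Set (List Char)} (h : maxd < dist) :
    pvRecA maxd s pos dist acc = acc := by
  rw [pvRecA, if_pos h]

theorem pvEmitB_of_nonpos {budget : Int} (s : List Char) (pos : Nat) (h : budget ≤ 0) :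
    pvEmitB budget s pos = [] := by
  rw [pvEmitB]; simp [h]

theorem pvEmitB_of_len {budget : Int} {s : List Char} {pos : Nat} (h : s.length ≤ pos) :
    pvEmitB budget s pos = [] := by
  rw [pvEmitB]; simp [h]

theorem pvMem_ite_update (c : Prop) [Decidable c] {S : PySem.Set (List Char)}
    (l : List (List Char)) {x : List Char} (h : x ∈ S) :
    x ∈ (if c then PySem.Set.update S l else S) := by
  split
  · exact (PySem.Set.mem_update _ _ _).mpr (Or.inl h)
  · exact h

theorem pvUpdate_if (S : PySem.Set (List Char)) (c : Prop) [Decidable c]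
    (x : List Char) (l : List (List Char)) :
    PySem.Set.update S (if c then x :: l else []) =
      if c then PySem.Set.update S (x :: l) else S := by
  split <;> simp [PySem.Set.update_nil]

-- Core invariant: A's recursion equals "add s, then add B's emissions", for any accumulator.
theorem pvRecA_eq_update (maxd : Int) :
    ∀ (n : Nat) (s : List Char) (pos : Nat) (dist : Int) (acc : PySem.Set (List Char)),
      s.length - pos ≤ n → dist ≤ maxd →
      pvRecA maxd s pos dist acc =
        PySem.Set.update acc (s :: pvEmitB (maxd - dist) s pos) := by
  intro n
  induction n with
  | zero =>
    intro s pos dist acc hn hle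
    have hsp : s.length ≤ pos := by omega
    rw [pvRecA, if_neg (by omega : ¬ dist > maxd), dif_pos hsp,
        pvEmitB_of_len hsp, PySem.Set.update_cons, PySem.Set.update_nil]
  | succ n ih =>
    intro s pos dist acc hn hle
    rw [pvRecA, if_neg (by omega : ¬ dist > maxd)]
    by_cases hsp : s.length ≤ pos
    · rw [dif_pos hsp, pvEmitB_of_len hsp, PySem.Set.update_cons, PySem.Set.update_nil]
    · rw [dif_neg hsp]
      simp only []
      by_cases hr : maxd - dist ≤ 0
      · -- budget exhausted: every substitution branch returns its accumulator unchanged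
        simp only [pvRecA_of_gt (show maxd < dist + 1 by omega), ite_self]
        rw [ih s (pos+1) dist _ (by omega) hle, pvEmitB_of_nonpos _ _ hr,
            pvEmitB_of_nonpos _ _ hr, PySem.Set.update_cons, PySem.Set.update_nil,
            PySem.Set.update_cons, PySem.Set.update_nil,
            PySem.Set.add_of_mem (by simp [PySem.Set.mem_add])]
      · -- budget ≥ 1
        have hlen : ∀ b : Char, (pvSubst s pos b).length = s.length :=
          fun b => pvSubst_length (by omega) b
        have e1 : maxd - (dist + 1) = maxd - dist - 1 := by ring
        have hsub : ∀ (b : Char) (X : PySem.Set (List Char)),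
            pvRecA maxd (pvSubst s pos b) (pos+1) (dist+1) X =
              PySem.Set.update X
                (pvSubst s pos b :: pvEmitB (maxd - dist - 1) (pvSubst s pos b) (pos+1)) := by
          intro b X
          rw [ih _ _ _ X (by rw [hlen]; omega) (by omega), e1]
        simp only [hsub]
        rw [ih s (pos+1) dist _ (by omega) hle]
        conv_rhs => rw [pvEmitB, if_neg hr, dif_neg hsp]
        simp only []
        conv_rhs => rw [PySem.Set.update_cons, PySem.Set.update_append, PySem.Set.update_append,
            PySem.Set.update_append, PySem.Set.update_append,
            pvUpdate_if, pvUpdate_if, pvUpdate_if, pvUpdate_if]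
        conv_lhs => rw [PySem.Set.update_cons]
        congr 1
        exact PySem.Set.add_of_mem
          (pvMem_ite_update _ _ (pvMem_ite_update _ _ (pvMem_ite_update _ _ (pvMem_ite_update _ _
            ((PySem.Set.mem_add _ _ _).mpr (Or.inr rfl))))))

-- ===== VERDICT (by name: the statement is the Claim_ definition above) =====
theorem get_hamming_neighbors_spec : Claim_equal_get_hamming_neighbors := by
  intro sequence max_dist _
  unfold Spec_get_hamming_neighbors get_hamming_neighbors get_hamming_neighbors_alt
  by_cases hneg : max_dist < 0
  · rw [pvRecA]
    simp [hneg, PySem.Set.empty]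
  · rw [if_neg hneg,
        pvRecA_eq_update max_dist (sequence.toList.length - 0) sequence.toList 0 0
          PySem.Set.empty (le_refl _) (by omega)]
    rw [← PySem.Set.update_empty, PySem.Set.update_cons]
    simp [PySem.Set.empty, PySem.Set.add]
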